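-- pv_equiv track=rewrite | github.com/fdgrock/gaming-ai-bot | streamlit_app/Backup/ai_lottery_bot/set_optimizer.py | _generate_contrarian_set
-- ===== SOURCE A (Python) =====
-- from typing import Dict, List, Tuple, Any, Optional, Set
-- from collections import defaultdict, Counter
--
-- def _generate_contrarian_set(base_predictions: List[List[int]],
--                            numbers_per_set: int, max_number: int) -> List[int]:
--     """Generate a set using contrarian logic (opposite of trends)"""
--     # Find most frequently predicted numbers
--     number_frequencies = Counter()
--     for pred_set in base_predictions:
--         for number in pred_set:
--             number_frequencies[number] += 1
--
--     # Select least frequently predicted numbers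
--     all_numbers = list(range(1, max_number + 1))
--     frequency_sorted = sorted(all_numbers, key=lambda x: number_frequencies.get(x, 0))
--
--     # Take numbers from the least frequent end
--     contrarian_set = frequency_sorted[:numbers_per_set]
--
--     return contrarian_set
-- ===== SOURCE B (Python) =====
-- from typing import List
-- from collections import Counter
--
-- def _generate_contrarian_set(base_predictions: List[List[int]],
--                            numbers_per_set: int, max_number: int) -> List[int]:
--     """Counting-sort version: bucket numbers 1..max_number by predicted frequency."""
--     freq = Counter()
--     for pred_set in base_predictions:
--         for number in pred_set:
--             freq[number] += 1
--
--     total = sum(len(s) for s in base_predictions)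
--     buckets = [[] for _ in range(total + 1)]
--     for n in range(1, max_number + 1):
--         buckets[freq.get(n, 0)].append(n)
--
--     ordered = [x for b in buckets for x in b]
--     return ordered[:numbers_per_set]
-- ===== Notes on version B (the rewrite author's own statement) =====
-- stated objective: alternative
-- what changed: Replaces the comparison sort of 1..max_number keyed by frequency with a counting-sort-style bucket sweep: numbers are appended in ascending order to buckets indexed by their predicted frequency and the buckets are concatenated in ascending frequency order, preserving the stable tie-break and the final [:numbers_per_set] slice.
import Mathlib
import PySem

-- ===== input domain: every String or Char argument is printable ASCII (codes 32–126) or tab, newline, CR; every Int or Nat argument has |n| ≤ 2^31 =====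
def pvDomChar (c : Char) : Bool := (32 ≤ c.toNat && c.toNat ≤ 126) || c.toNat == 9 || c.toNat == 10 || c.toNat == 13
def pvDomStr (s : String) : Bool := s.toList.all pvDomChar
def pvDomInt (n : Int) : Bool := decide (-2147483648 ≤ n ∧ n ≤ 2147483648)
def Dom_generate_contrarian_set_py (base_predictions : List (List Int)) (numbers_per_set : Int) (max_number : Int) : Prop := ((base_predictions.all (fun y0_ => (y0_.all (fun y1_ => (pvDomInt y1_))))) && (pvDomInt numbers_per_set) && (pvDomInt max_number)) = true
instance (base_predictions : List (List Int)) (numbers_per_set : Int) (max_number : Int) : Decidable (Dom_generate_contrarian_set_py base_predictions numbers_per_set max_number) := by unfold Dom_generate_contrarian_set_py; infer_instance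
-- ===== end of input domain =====

-- B replaces A's comparison sort of 1..max_number by frequency with a counting-sort-style
-- bucket sweep (buckets indexed by frequency), keeping the same final [:numbers_per_set] slice.

-- ===== PORT A =====
-- Python's sorted(all_numbers, key=…) is a stable sort by key; since all_numbers = range(1, max_number+1)
-- is strictly increasing, that stable sort is exactly a sort under the lexicographic (key, element)
-- order, realized here with List.mergeSort so the port can be evaluated on large ranges (the
-- insertion-sort model PySem.List.sorted overflows the interpreter's stack there); the lemmas below
-- prove this port equal to the unique (key, element)-ordered rearrangement, i.e. Python's stable result.
def generate_contrarian_set_py (base_predictions : List (List Int)) (numbers_per_set : Int) (max_number : Int) : List Int :=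
  let number_frequencies : PySem.Dict Int Int :=
    base_predictions.foldl (fun d pred_set =>
      pred_set.foldl (fun d number => d.modify number 0 (fun c => c + 1)) d) (PySem.Dict.mk [])
  let all_numbers := PySem.List.pyRange 1 (max_number + 1) 1
  let frequency_sorted := all_numbers.mergeSort (fun a b =>
    decide (number_frequencies.getD a 0 < number_frequencies.getD b 0) ||
    (decide (number_frequencies.getD a 0 = number_frequencies.getD b 0) && decide (a ≤ b)))
  PySem.List.slice frequency_sorted none (some numbers_per_set)

-- ===== PORT B =====
-- buckets[f].append(n) is transliterated as consing n onto bucket f plus one reverse of each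
-- bucket at the end (the standard accumulator form of append); buckets is an Array for O(1) update.
def generate_contrarian_set_py_alt (base_predictions : List (List Int)) (numbers_per_set : Int) (max_number : Int) : List Int :=
  let freq : PySem.Dict Int Int :=
    base_predictions.foldl (fun d pred_set =>
      pred_set.foldl (fun d number => d.modify number 0 (fun c => c + 1)) d) (PySem.Dict.mk [])
  let total : Nat := base_predictions.foldl (fun a s => a + s.length) 0
  let buckets : Array (List Int) :=
    (PySem.List.pyRange 1 (max_number + 1) 1).foldl
      (fun bs n => bs.setIfInBounds (freq.getD n 0).toNat (n :: bs.getD (freq.getD n 0).toNat []))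
      (Array.replicate (total + 1) ([] : List Int))
  let ordered := (buckets.toList.map List.reverse).flatten
  PySem.List.slice ordered none (some numbers_per_set)

-- ===== PRECONDITION & SPEC =====
-- A is total: no Pre_.
def Spec_generate_contrarian_set_py (base_predictions : List (List Int)) (numbers_per_set : Int) (max_number : Int) (out : List Int) : Prop := out = generate_contrarian_set_py_alt base_predictions numbers_per_set max_number
instance (base_predictions : List (List Int)) (numbers_per_set : Int) (max_number : Int) (out : List Int) : Decidable (Spec_generate_contrarian_set_py base_predictions numbers_per_set max_number out) := by unfold Spec_generate_contrarian_set_py; infer_instance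

-- ===== CLAIM (what is proved, stated in full; the proofs are below) =====
def Claim_equal_generate_contrarian_set_py : Prop := ∀ (base_predictions : List (List Int)) (numbers_per_set : Int) (max_number : Int), Dom_generate_contrarian_set_py base_predictions numbers_per_set max_number → Spec_generate_contrarian_set_py base_predictions numbers_per_set max_number (generate_contrarian_set_py base_predictions numbers_per_set max_number)

-- ===== LEMMAS AND PROOFS =====

-- Bucket image of a list: concatenation, over frequencies 0..T, of the elements with that key.
def pvSb (key : Int → Int) (T : Nat) (q : List Int) : List Int :=
  (List.range (T + 1)).flatMap (fun f => q.filter (fun z => key z = Int.ofNat f))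

theorem pv_insertBy_all_before {α : Type} (before : α → α → Bool) (x : α) (l : List α)
    (h : ∀ y ∈ l, before x y = true) : PySem.List.insertBy before x l = x :: l := by
  cases l with
  | nil => simp [PySem.List.insertBy]
  | cons y ys => simp [PySem.List.insertBy, h y (by simp)]

theorem pv_insertBy_append_not_before {α : Type} (before : α → α → Bool) (x : α) (l1 l2 : List α)
    (h : ∀ y ∈ l1, before x y = false) :
    PySem.List.insertBy before x (l1 ++ l2) = l1 ++ PySem.List.insertBy before x l2 := by
  induction l1 with
  | nil => simp
  | cons y ys ih =>
      simp [PySem.List.insertBy, h y (by simp)]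
      exact ih (fun z hz => h z (by simp [hz]))

theorem pv_flatMap_congr {α β : Type} (l : List α) (f g : α → List β)
    (h : ∀ a ∈ l, f a = g a) : l.flatMap f = l.flatMap g := by
  induction l with
  | nil => rfl
  | cons a l ih =>
      simp only [List.flatMap_cons, h a (by simp)]
      rw [ih (fun b hb => h b (by simp [hb]))]

theorem pv_insertBy_Sb (key : Int → Int) (T : Nat) (p : List Int) (x : Int)
    (h0 : 0 ≤ key x) (hT : key x ≤ (T : Int)) :
    PySem.List.insertBy (fun a b => decide (key a < key b)) x (pvSb key T p)
      = pvSb key T (p ++ [x]) := by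
  have hk : key x = ((key x).toNat : Int) := (Int.toNat_of_nonneg h0).symm
  set k := (key x).toNat with hkdef
  have hkT : k ≤ T := by omega
  have hrange : List.range (T + 1) = List.range (k + 1) ++ (List.range (T - k)).map (fun j => (k + 1) + j) := by
    rw [show T + 1 = (k + 1) + (T - k) by omega, List.range_add]
  unfold pvSb
  rw [hrange, List.flatMap_append, List.flatMap_append, List.flatMap_map, List.flatMap_map]
  have hA1 : ∀ y ∈ (List.range (k + 1)).flatMap (fun f => p.filter (fun z => key z = Int.ofNat f)),
      (fun a b => decide (key a < key b)) x y = false := by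
    intro y hy
    simp only [List.mem_flatMap, List.mem_filter, decide_eq_true_eq] at hy
    obtain ⟨f, hf, -, hkey⟩ := hy
    have hfk : f < k + 1 := List.mem_range.mp hf
    simp only [decide_eq_false_iff_not, not_lt, hkey, hk, Int.ofNat_eq_natCast]
    exact_mod_cast Nat.le_of_lt_succ hfk
  have hA2 : ∀ y ∈ (List.range (T - k)).flatMap
      ((fun f => p.filter (fun z => key z = Int.ofNat f)) ∘ (fun j => (k + 1) + j)),
      (fun a b => decide (key a < key b)) x y = true := by
    intro y hy
    simp only [Function.comp, List.mem_flatMap, List.mem_filter, decide_eq_true_eq] at hy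
    obtain ⟨j, hj, -, hkey⟩ := hy
    simp only [decide_eq_true_eq, hkey, hk, Int.ofNat_eq_natCast]
    exact_mod_cast by omega
  rw [pv_insertBy_append_not_before _ _ _ _ hA1, pv_insertBy_all_before _ _ _ hA2]
  have hfilt : ∀ (f : Nat), (p ++ [x]).filter (fun z => key z = Int.ofNat f)
      = p.filter (fun z => key z = Int.ofNat f) ++ (if k = f then [x] else []) := by
    intro f
    rw [List.filter_append]
    congr 1
    by_cases hfk : k = f
    · subst hfk
      simp only [List.filter, Int.ofNat_eq_natCast, ← hk]
      simp
    · simp only [List.filter]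
      rw [decide_eq_false (show ¬ key x = Int.ofNat f by rw [hk, Int.ofNat_eq_natCast]; exact_mod_cast hfk)]
      simp [hfk]
  have hleft : (List.range (k + 1)).flatMap (fun f => (p ++ [x]).filter (fun z => key z = Int.ofNat f))
      = (List.range (k + 1)).flatMap (fun f => p.filter (fun z => key z = Int.ofNat f)) ++ [x] := by
    rw [List.range_succ, List.flatMap_append, List.flatMap_append]
    rw [pv_flatMap_congr (List.range k) _ (fun f => p.filter (fun z => key z = Int.ofNat f))
      (by intro f hf; rw [hfilt f, if_neg (by have := List.mem_range.mp hf; omega)]; simp)]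
    simp only [List.flatMap_cons, List.flatMap_nil, List.append_nil]
    rw [hfilt k, if_pos rfl]
    simp [List.append_assoc]
  have hright : (List.range (T - k)).flatMap
      (fun j => (p ++ [x]).filter (fun z => key z = Int.ofNat ((k + 1) + j)))
      = (List.range (T - k)).flatMap
      (fun j => p.filter (fun z => key z = Int.ofNat ((k + 1) + j))) := by
    apply pv_flatMap_congr
    intro j hj
    rw [hfilt ((k + 1) + j), if_neg (by omega)]
    simp
  rw [hleft, hright]
  simp [List.append_assoc]

-- pvSb key T xs is Python's sorted(xs, key): proved through PySem's insertion-sort model.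
theorem pv_sorted_eq_Sb (key : Int → Int) (T : Nat) (xs : List Int)
    (h : ∀ x ∈ xs, 0 ≤ key x ∧ key x ≤ (T : Int)) :
    PySem.List.sorted xs key false = pvSb key T xs := by
  revert h
  induction xs using List.reverseRecOn with
  | nil =>
      intro _
      rw [PySem.List.sorted_eq_foldl_insertBy]
      simp [pvSb]
  | append_singleton p x ih =>
      intro h
      rw [PySem.List.sorted_eq_foldl_insertBy, List.foldl_append, List.foldl_cons, List.foldl_nil,
          ← PySem.List.sorted_eq_foldl_insertBy]
      rw [ih (fun z hz => h z (List.mem_append_left _ hz))]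
      exact pv_insertBy_Sb key T p x (h x (by simp)).1 (h x (by simp)).2

theorem pv_Sb_perm (key : Int → Int) (T : Nat) (xs : List Int)
    (h : ∀ x ∈ xs, 0 ≤ key x ∧ key x ≤ (T : Int)) : (pvSb key T xs).Perm xs := by
  rw [← pv_sorted_eq_Sb key T xs h]
  exact PySem.List.sorted_perm xs key false

theorem pv_pairwise_Sb (key : Int → Int) (T : Nat) (xs : List Int)
    (hx : xs.Pairwise (· < ·)) :
    (pvSb key T xs).Pairwise (fun a b =>
      (decide (key a < key b) || (decide (key a = key b) && decide (a ≤ b))) = true) := by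
  unfold pvSb
  rw [List.flatMap_def, List.pairwise_flatten]
  constructor
  · intro l hl
    simp only [List.mem_map] at hl
    obtain ⟨f, hf, rfl⟩ := hl
    refine (hx.filter _).imp_of_mem ?_
    intro a b ha hb hab
    simp only [List.mem_filter, decide_eq_true_eq] at ha hb
    simp only [Bool.or_eq_true, Bool.and_eq_true, decide_eq_true_eq]
    right
    exact ⟨ha.2.trans hb.2.symm, le_of_lt hab⟩
  · rw [List.pairwise_map]
    refine List.pairwise_lt_range.imp ?_
    intro f1 f2 h12 x hx' y hy'
    simp only [List.mem_filter, decide_eq_true_eq] at hx' hy'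
    simp only [Bool.or_eq_true, decide_eq_true_eq]
    left
    rw [hx'.2, hy'.2]
    exact Int.ofNat_lt.mpr h12

theorem pv_mergeSort_eq_Sb (key : Int → Int) (T : Nat) (xs : List Int) (le : Int → Int → Bool)
    (hle : ∀ a b, le a b =
      (decide (key a < key b) || (decide (key a = key b) && decide (a ≤ b))))
    (hb : ∀ x ∈ xs, 0 ≤ key x ∧ key x ≤ (T : Int))
    (hx : xs.Pairwise (· < ·)) :
    xs.mergeSort le = pvSb key T xs := by
  refine List.Perm.eq_of_pairwise (le := fun a b => le a b = true) ?_ ?_ ?_ ?_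
  · intro a b _ _ h1 h2
    rw [hle] at h1 h2
    simp only [Bool.or_eq_true, Bool.and_eq_true, decide_eq_true_eq] at h1 h2
    omega
  · exact List.pairwise_mergeSort
      (by intro a b c h1 h2; rw [hle] at *; simp only [Bool.or_eq_true, Bool.and_eq_true, decide_eq_true_eq] at *; omega)
      (by intro a b; rw [hle, hle]; simp only [Bool.or_eq_true, Bool.and_eq_true, decide_eq_true_eq]; omega)
      xs
  · refine (pv_pairwise_Sb key T xs hx).imp ?_
    intro a b h; rw [hle]; exact h
  · exact (List.mergeSort_perm xs le).trans (pv_Sb_perm key T xs hb).symm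

theorem pv_bucket_fold_arr (key : Int → Int) :
    ∀ (xs : List Int) (bs : Array (List Int)),
    (xs.foldl (fun bs n => bs.setIfInBounds (key n).toNat (n :: bs.getD (key n).toNat [])) bs).toList
      = (List.range bs.size).map
          (fun i => (xs.filter (fun z => (key z).toNat = i)).reverse ++ bs.getD i []) := by
  intro xs
  induction xs with
  | nil =>
      intro bs
      simp only [List.foldl_nil, List.filter_nil, List.reverse_nil, List.nil_append]
      apply List.ext_getElem
      · simp
      · intro i h1 h2
        simp only [List.getElem_map, List.getElem_range, Array.getD_eq_getD_getElem?]
        rw [Array.getElem?_eq_getElem (by simpa using h1)]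
        simp [Array.getElem_toList]
  | cons x xs ih =>
      intro bs
      rw [List.foldl_cons, ih]
      simp only [Array.size_setIfInBounds]
      apply List.map_congr_left
      intro i hi
      have hi' : i < bs.size := List.mem_range.mp hi
      rw [List.filter_cons]
      by_cases hc : (key x).toNat = i
      · rw [if_pos (by simp [hc])]
        have hset : (bs.setIfInBounds (key x).toNat (x :: bs.getD (key x).toNat [])).getD i []
            = x :: bs.getD i [] := by
          simp [Array.getD_eq_getD_getElem?, hc, hi']
        rw [hset]
        simp [List.append_assoc]
      · rw [if_neg (by simp [hc])]
        have hset : (bs.setIfInBounds (key x).toNat (x :: bs.getD (key x).toNat [])).getD i []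
            = bs.getD i [] := by
          simp [Array.getD_eq_getD_getElem?, hc]
        rw [hset]

theorem pv_foldl_length (l : List (List Int)) : ∀ (a : Nat),
    l.foldl (fun a s => a + s.length) a = a + (l.map List.length).sum := by
  induction l with
  | nil => intro a; simp
  | cons x l ih => intro a; simp only [List.foldl_cons, List.map_cons, List.sum_cons, ih]; omega

theorem pv_getD_replicate_nil (n i : Nat) :
    (Array.replicate n ([] : List Int)).getD i [] = [] := by
  rw [Array.getD_eq_getD_getElem?, Array.getElem?_replicate]
  split_ifs <;> rfl

-- ===== VERDICT (by name: the statement is the Claim_ definition above) =====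
theorem generate_contrarian_set_py_spec : Claim_equal_generate_contrarian_set_py := by
  intro bp nps mx _
  unfold Spec_generate_contrarian_set_py generate_contrarian_set_py generate_contrarian_set_py_alt
  dsimp only
  set cnt : PySem.Dict Int Int :=
    bp.foldl (fun d pred_set =>
      pred_set.foldl (fun d number => d.modify number 0 (fun c => c + 1)) d) (PySem.Dict.mk [])
    with hcntdef
  set T : Nat := bp.foldl (fun a s => a + s.length) 0 with hTdef
  set xs := PySem.List.pyRange 1 (mx + 1) 1 with hxs
  have hcount : ∀ v, cnt.getD v 0 = ((bp.flatten.count v : Nat) : Int) := by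
    intro v
    have hfl : cnt = bp.flatten.foldl (fun d n => d.modify n 0 (fun c => c + 1)) (PySem.Dict.mk []) := by
      rw [hcntdef, List.foldl_flatten]
    rw [hfl, PySem.Dict.getD_foldl_modify_add_one]
    simp [PySem.Dict.getD, PySem.Dict.get?]
  have hT : (T : Int) = ((bp.flatten.length : Nat) : Int) := by
    rw [hTdef, pv_foldl_length, List.length_flatten]
    simp
  have hb : ∀ x ∈ xs, 0 ≤ cnt.getD x 0 ∧ cnt.getD x 0 ≤ (T : Int) := by
    intro x _
    rw [hcount x, hT]
    constructor
    · positivity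
    · exact_mod_cast List.count_le_length
  have hpw : xs.Pairwise (· < ·) := by
    rw [hxs]; exact PySem.List.pairwise_lt_pyRange_one 1 (mx + 1)
  congr 1
  rw [pv_mergeSort_eq_Sb (fun n => cnt.getD n 0) T xs _ (fun a b => rfl) hb hpw]
  rw [pv_bucket_fold_arr (fun n => cnt.getD n 0) xs (Array.replicate (T + 1) ([] : List Int))]
  simp only [Array.size_replicate, pv_getD_replicate_nil, List.append_nil,
    List.map_map, Function.comp_def, List.reverse_reverse]
  rw [← List.flatMap_def]
  unfold pvSb
  apply pv_flatMap_congr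
  intro f hf
  apply List.filter_congr
  intro z hz
  have h0 : 0 ≤ cnt.getD z 0 := (hb z hz).1
  simp only [decide_eq_decide, Int.ofNat_eq_natCast]
  omega
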